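-- pv_equiv track=rewrite | github.com/chris45724/Kris-Stuff | Projects/PythonProjects/Modules/Encoders.py | customArrowDecode
-- ===== SOURCE A (Python) =====
-- def customArrowDecode(code : str):
--     output = 0
--     for position in range(int(len(code))):
--         power = (int(len(code))-position) - 1
--         solution = 0
--         #here = code[position]
--         if code[position] == '>':
--                 solution = solution + 2*(3**power)
--         elif code[position] == '<':
--                 solution = solution + (3**power)
--         output = output + int(solution)
--
--     return output
-- ===== SOURCE B (Python) =====
-- def customArrowDecode(code : str):
--     # Horner's method: one left-to-right pass, no per-position exponentiation.
--     output = 0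
--     for ch in code:
--         output = output * 3 + (2 if ch == '>' else 1 if ch == '<' else 0)
--     return output
-- ===== Notes on version B (the rewrite author's own statement) =====
-- stated objective: faster
-- what changed: Replaces per-position computation of 3**power (a fresh big-int exponentiation for every character) with Horner's rule accumulating output = output*3 + digit in one pass.
import Mathlib
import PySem

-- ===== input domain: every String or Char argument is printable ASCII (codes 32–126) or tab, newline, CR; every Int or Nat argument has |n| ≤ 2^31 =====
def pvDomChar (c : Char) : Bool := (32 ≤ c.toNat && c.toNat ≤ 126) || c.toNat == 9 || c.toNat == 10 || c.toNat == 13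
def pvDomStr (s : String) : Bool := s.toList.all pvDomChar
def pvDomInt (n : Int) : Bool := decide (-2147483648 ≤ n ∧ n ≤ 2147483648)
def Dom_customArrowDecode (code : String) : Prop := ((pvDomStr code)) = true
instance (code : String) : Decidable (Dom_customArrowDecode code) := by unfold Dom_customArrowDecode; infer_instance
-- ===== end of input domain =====

-- B replaces A's per-position 3**power exponentiation with Horner's rule (output = output*3 + digit) in one pass.
-- ===== PORT A =====
-- literal port: for position in range(len(code)): power = len-position-1; solution = 0; if/elif on code[position]; output += solution
def customArrowDecode (code : String) : Int :=
  (List.range code.toList.length).foldl (fun output position =>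
    let power : Nat := code.toList.length - position - 1
    let solution : Int :=
      if code.toList[position]? = some '>' then 0 + 2 * 3 ^ power
      else if code.toList[position]? = some '<' then 0 + 3 ^ power
      else 0
    output + solution) 0

-- ===== PORT B =====
def customArrowDecode_alt (code : String) : Int :=
  code.toList.foldl (fun output ch =>
    output * 3 + (if ch = '>' then 2 else if ch = '<' then 1 else 0)) 0

-- ===== PRECONDITION & SPEC =====
def Spec_customArrowDecode (code : String) (out : Int) : Prop := out = customArrowDecode_alt code
instance (code : String) (out : Int) : Decidable (Spec_customArrowDecode code out) := by unfold Spec_customArrowDecode; infer_instance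

-- ===== CLAIM (what is proved, stated in full; the proofs are below) =====
def Claim_equal_customArrowDecode : Prop := ∀ (code : String), Dom_customArrowDecode code → Spec_customArrowDecode code (customArrowDecode code)

-- ===== LEMMAS AND PROOFS =====
-- per-position value of A, as a function of the (optional) character and the power
def pvDA (o : Option Char) (power : Nat) : Int :=
  if o = some '>' then 0 + 2 * 3 ^ power else if o = some '<' then 0 + 3 ^ power else 0

-- Horner digit of B
def pvDB (c : Char) : Int := if c = '>' then 2 else if c = '<' then 1 else 0

lemma pvDA_succ (o : Option Char) (k : Nat) : pvDA o (k + 1) = 3 * pvDA o k := by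
  unfold pvDA; split_ifs <;> ring

lemma pvDA_some_zero (c : Char) : pvDA (some c) 0 = pvDB c := by
  unfold pvDA pvDB; split_ifs with h1 h2 <;> simp_all

lemma pv_foldl_add (g : Nat → Int) (r : List Nat) (a : Int) :
    r.foldl (fun o p => o + g p) a = a + (r.map g).sum := by
  induction r generalizing a with
  | nil => simp
  | cons x t ih => simp [List.foldl_cons, ih]; ring

def pvSumA (l : List Char) : Int :=
  ((List.range l.length).map (fun p => pvDA l[p]? (l.length - p - 1))).sum

lemma pvSumA_append (l : List Char) (c : Char) :
    pvSumA (l ++ [c]) = 3 * pvSumA l + pvDB c := by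
  unfold pvSumA
  rw [List.length_append, List.length_singleton, List.range_succ, List.map_append,
    List.sum_append]
  have hmap : (List.range l.length).map
      (fun p => pvDA (l ++ [c])[p]? (l.length + 1 - p - 1))
      = (List.range l.length).map (fun p => 3 * pvDA l[p]? (l.length - p - 1)) := by
    apply List.map_congr_left
    intro p hp
    have hplt : p < l.length := List.mem_range.mp hp
    have hget : (l ++ [c])[p]? = l[p]? := List.getElem?_append_left hplt
    have hpow : l.length + 1 - p - 1 = (l.length - p - 1) + 1 := by omega
    rw [hget, hpow, pvDA_succ]
  rw [hmap]
  simp [pvDA_some_zero]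
  rw [List.sum_map_mul_left]

lemma pvSumA_eq_horner (l : List Char) :
    pvSumA l = l.foldl (fun output ch => output * 3 + pvDB ch) 0 := by
  induction l using List.reverseRecOn with
  | nil => simp [pvSumA]
  | append_singleton t c ih =>
    rw [pvSumA_append, List.foldl_append, List.foldl_cons, List.foldl_nil, ih]
    ring


-- ===== VERDICT (by name: the statement is the Claim_ definition above) =====
theorem customArrowDecode_spec : Claim_equal_customArrowDecode := by
  intro code _
  show customArrowDecode code = customArrowDecode_alt code
  have hA : customArrowDecode code
      = (List.range code.toList.length).foldl
          (fun o p => o + pvDA code.toList[p]? (code.toList.length - p - 1)) 0 := rfl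
  rw [hA, pv_foldl_add]
  have hB : customArrowDecode_alt code
      = code.toList.foldl (fun output ch => output * 3 + pvDB ch) 0 := rfl
  rw [hB, ← pvSumA_eq_horner, pvSumA, zero_add]
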